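-- pv_equiv track=rewrite | github.com/govindp47/sentinel-ai-guardrail | backend/src/sentinel/infrastructure/chunking/text_chunker.py | _overlap_seed
-- ===== SOURCE A (Python) =====
-- def _overlap_seed(buffer: list[str], overlap: int) -> list[str]:
--     """Return trailing sentences whose combined length ≤ overlap.
--
--     Walks the buffer backwards collecting sentences until adding the
--     next one would exceed *overlap* characters.  If even a single
--     sentence is longer than *overlap*, returns an empty list (the hard
--     overlap will be applied at the text level by the caller).
--     """
--     if overlap <= 0:
--         return []
--
--     seed: list[str] = []
--     accumulated = 0
--     for sentence in reversed(buffer):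
--         cost = len(sentence) + (1 if seed else 0)
--         if accumulated + cost <= overlap:
--             seed.insert(0, sentence)
--             accumulated += cost
--         else:
--             break
--     return seed
-- ===== SOURCE B (Python) =====
-- def _overlap_seed(buffer: list[str], overlap: int) -> list[str]:
--     """Cumulative-cost table over the reversed buffer, then one cut.
--
--     Instead of greedily pushing sentences and breaking, build the running
--     cumulative costs of the reversed buffer (a separator char is charged for
--     every sentence after the first), count how many leading cumulative costs
--     fit in the budget, and slice that many trailing sentences off the buffer.
--     """
--     if overlap <= 0:
--         return []
--     rev = list(reversed(buffer))
--     cum = []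
--     total = 0
--     first = True
--     for s in rev:
--         total += len(s) + (0 if first else 1)
--         first = False
--         cum.append(total)
--     count = sum(1 for c in cum if c <= overlap)
--     return buffer[len(buffer) - count:]
-- ===== Notes on version B (the rewrite author's own statement) =====
-- stated objective: faster
-- what changed: Replaces the greedy insert-at-front/break loop with a cumulative-cost table over the reversed buffer, a count of fitting prefixes, and one trailing slice; this removes A's O(k) seed.insert(0, ...) per kept sentence.
import Mathlib
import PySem

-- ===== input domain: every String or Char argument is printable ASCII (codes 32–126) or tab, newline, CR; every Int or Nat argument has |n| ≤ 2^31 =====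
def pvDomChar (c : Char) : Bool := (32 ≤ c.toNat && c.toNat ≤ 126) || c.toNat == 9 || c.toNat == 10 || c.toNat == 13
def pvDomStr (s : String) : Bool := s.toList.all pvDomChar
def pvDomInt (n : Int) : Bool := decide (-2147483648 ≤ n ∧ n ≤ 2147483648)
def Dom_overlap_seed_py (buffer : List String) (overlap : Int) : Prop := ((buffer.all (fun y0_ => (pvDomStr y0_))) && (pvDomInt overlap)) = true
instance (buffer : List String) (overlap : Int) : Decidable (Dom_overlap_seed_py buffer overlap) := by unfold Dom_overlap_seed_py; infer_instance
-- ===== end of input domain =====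

-- B replaces A's greedy insert-at-front/break loop with a cumulative-cost table, a count
-- of fitting prefixes, and one trailing slice (avoids A's per-step insert at index 0).

-- ===== PORT A =====
-- the for-loop over reversed(buffer) with state (seed, accumulated); `break` = return seed
def overlapSeedLoopA (overlap : Int) : List String → List String → Int → List String
  | [], seed, _ => seed
  | sentence :: rest, seed, accumulated =>
    let cost : Int := PySem.Str.len sentence + (if seed.isEmpty then 0 else 1)
    if accumulated + cost ≤ overlap then
      -- seed.insert(0, sentence) is cons at the front
      overlapSeedLoopA overlap rest (sentence :: seed) (accumulated + cost)
    else seed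

def overlap_seed_py (buffer : List String) (overlap : Int) : List String :=
  if overlap ≤ 0 then []
  else overlapSeedLoopA overlap buffer.reverse [] 0

-- ===== PORT B =====
-- the cum-building loop of Source B, with the running total and the `first` flag
def overlapCumB : List String → Int → Bool → List Int
  | [], _, _ => []
  | s :: rest, total, first =>
    let total' : Int := total + PySem.Str.len s + (if first then 0 else 1)
    total' :: overlapCumB rest total' false

def overlap_seed_py_alt (buffer : List String) (overlap : Int) : List String :=
  if overlap ≤ 0 then []
  else
    let rev := buffer.reverse
    let cum := overlapCumB rev 0 true
    let count := cum.countP (fun c => decide (c ≤ overlap))   -- sum(1 for c in cum if c <= overlap)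
    PySem.List.slice buffer (some ((buffer.length : Int) - (count : Int))) none   -- buffer[len(buffer)-count:]

-- ===== PRECONDITION & SPEC =====
def Spec_overlap_seed_py (buffer : List String) (overlap : Int) (out : List String) : Prop := out = overlap_seed_py_alt buffer overlap
instance (buffer : List String) (overlap : Int) (out : List String) : Decidable (Spec_overlap_seed_py buffer overlap out) := by unfold Spec_overlap_seed_py; infer_instance

-- ===== CLAIM (what is proved, stated in full; the proofs are below) =====
def Claim_equal_overlap_seed_py : Prop := ∀ (buffer : List String) (overlap : Int), Dom_overlap_seed_py buffer overlap → Spec_overlap_seed_py buffer overlap (overlap_seed_py buffer overlap)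

-- ===== LEMMAS AND PROOFS =====

-- proof-side count: how many elements A's greedy loop takes from xs given state (acc, flag)
def cntG (overlap : Int) : List String → Int → Bool → Nat
  | [], _, _ => 0
  | s :: rest, acc, first =>
    let cost : Int := PySem.Str.len s + (if first then 0 else 1)
    if acc + cost ≤ overlap then cntG overlap rest (acc + cost) false + 1 else 0

theorem cntG_le_length (overlap : Int) (xs : List String) (acc : Int) (f : Bool) :
    cntG overlap xs acc f ≤ xs.length := by
  induction xs generalizing acc f with
  | nil => simp [cntG]
  | cons s rest ih =>
    simp only [cntG, List.length_cons]
    by_cases h : acc + (PySem.Str.len s + (if f then (0:Int) else 1)) ≤ overlap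
    · rw [if_pos h]; exact Nat.succ_le_succ (ih _ _)
    · rw [if_neg h]; exact Nat.zero_le _

theorem loopA_eq_take (overlap : Int) (xs : List String) (seed : List String) (acc : Int) :
    overlapSeedLoopA overlap xs seed acc
      = (xs.take (cntG overlap xs acc seed.isEmpty)).reverse ++ seed := by
  induction xs generalizing seed acc with
  | nil => simp [overlapSeedLoopA, cntG]
  | cons s rest ih =>
    simp only [overlapSeedLoopA, cntG]
    by_cases h : acc + (PySem.Str.len s + (if seed.isEmpty then (0:Int) else 1)) ≤ overlap
    · rw [if_pos h, if_pos h, ih]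
      simp [List.take_succ_cons]
    · rw [if_neg h, if_neg h]
      simp

theorem strLen_nonneg (s : String) : (0 : Int) ≤ PySem.Str.len s := by
  simp [PySem.Str.len_eq]

theorem countP_cumB_zero (overlap : Int) (xs : List String) (t : Int) (f : Bool)
    (ht : overlap < t) :
    (overlapCumB xs t f).countP (fun c => decide (c ≤ overlap)) = 0 := by
  induction xs generalizing t f with
  | nil => simp [overlapCumB]
  | cons s rest ih =>
    have hlen := strLen_nonneg s
    have ht' : overlap < t + PySem.Str.len s + (if f then (0:Int) else 1) := by
      split <;> omega
    simp only [overlapCumB, List.countP_cons, ih _ _ ht']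
    rw [if_neg (by simpa using not_le.mpr ht')]

theorem countP_cumB_eq_cntG (overlap : Int) (xs : List String) (t : Int) (f : Bool) :
    (overlapCumB xs t f).countP (fun c => decide (c ≤ overlap)) = cntG overlap xs t f := by
  induction xs generalizing t f with
  | nil => simp [overlapCumB, cntG]
  | cons s rest ih =>
    simp only [overlapCumB, cntG, List.countP_cons]
    have harith : t + PySem.Str.len s + (if f then (0:Int) else 1)
        = t + (PySem.Str.len s + (if f then (0:Int) else 1)) := by ring
    by_cases h : t + (PySem.Str.len s + (if f then (0:Int) else 1)) ≤ overlap
    · rw [ih, harith, if_pos h]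
      simp
      simpa using h
    · rw [harith, countP_cumB_zero overlap rest _ false (by omega), if_neg h]
      simp
      rw [← not_le]
      simpa using h

theorem overlap_seed_py_spec_aux (buffer : List String) (overlap : Int) :
    overlap_seed_py buffer overlap = overlap_seed_py_alt buffer overlap := by
  unfold overlap_seed_py overlap_seed_py_alt
  split
  · rfl
  · dsimp only
    rw [loopA_eq_take, countP_cumB_eq_cntG]
    simp only [List.isEmpty_nil]
    set k := cntG overlap buffer.reverse 0 true with hk
    have hkle : k ≤ buffer.length := by
      have := cntG_le_length overlap buffer.reverse 0 true
      simpa [hk] using this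
    have hcast : (buffer.length : Int) - (k : Int) = ((buffer.length - k : Nat) : Int) := by
      omega
    rw [hcast, PySem.List.slice_from_natCast]
    rw [List.append_nil]
    rw [List.take_reverse, List.reverse_reverse]

-- ===== VERDICT (by name: the statement is the Claim_ definition above) =====
theorem overlap_seed_py_spec : Claim_equal_overlap_seed_py := by
  intro buffer overlap _
  exact overlap_seed_py_spec_aux buffer overlap
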